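-- pv_equiv track=rewrite | github.com/SekaiMoeStudio/aosp_tool_utils | missing-blobs.py | identify_missing
-- ===== SOURCE A (Python) =====
-- from collections import defaultdict
--
-- def identify_missing(blobs_to_deps):
--     """
--     Find dependencies that are not present as blobs in the input set.
--     Returns: {missing_lib: [list_of_blobs_needing_it]}
--     """
--     # Build reverse map: dependency -> [blobs that need it]
--     dep_to_blobs = defaultdict(list)
--     for blob, deps in blobs_to_deps.items():
--         for dep in deps:
--             dep_to_blobs[dep].append(blob)
--
--     # Find missing deps: those not present as a blob filename
--     available_blobs = set(blobs_to_deps.keys())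
--     missing = {}
--     for dep, blobs in dep_to_blobs.items():
--         if dep not in available_blobs:
--             missing[dep] = blobs
--     return missing
-- ===== SOURCE B (Python) =====
-- def identify_missing(blobs_to_deps):
--     """
--     Find dependencies that are not present as blobs in the input set.
--     Returns: {missing_lib: [list_of_blobs_needing_it]}
--     """
--     available = set(blobs_to_deps)
--     pairs = [(dep, blob) for blob, deps in blobs_to_deps.items() for dep in deps]
--     order = dict.fromkeys(d for d, _ in pairs if d not in available)
--     return {dep: [b for d, b in pairs if d == dep] for dep in order}
-- ===== Notes on version B (the rewrite author's own statement) =====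
-- stated objective: alternative
-- what changed: B builds no reverse map at all: it flattens the input to a list of (dep, blob) pairs, ordered-dedups the deps that are not available keys, and gathers each missing dep's blob list by scanning the flat pair list per key, trading A's dict accumulation for flatten + dedup + per-key scans.
import Mathlib
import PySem

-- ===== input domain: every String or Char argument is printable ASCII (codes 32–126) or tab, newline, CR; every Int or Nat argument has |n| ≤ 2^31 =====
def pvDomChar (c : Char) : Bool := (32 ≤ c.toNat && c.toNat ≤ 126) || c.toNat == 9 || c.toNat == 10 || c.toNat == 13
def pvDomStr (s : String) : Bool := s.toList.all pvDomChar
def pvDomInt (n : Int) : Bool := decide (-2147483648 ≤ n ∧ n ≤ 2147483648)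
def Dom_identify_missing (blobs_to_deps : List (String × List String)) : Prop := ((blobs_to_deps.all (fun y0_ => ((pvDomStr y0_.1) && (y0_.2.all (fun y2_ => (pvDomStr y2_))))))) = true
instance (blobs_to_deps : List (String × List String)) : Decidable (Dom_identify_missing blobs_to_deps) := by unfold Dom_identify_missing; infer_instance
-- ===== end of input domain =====

-- B abandons A's dict-accumulation entirely: it flattens the input to (dep, blob) pairs,
-- dedups the missing deps in first-appearance order, and gathers each dep's blobs by a
-- per-key scan of the flat pair list (objective: alternative — no reverse map is built).

-- ===== PORT A =====
-- build reverse map dep -> blobs, then keep the deps that are not blob keys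
def identify_missing (blobs_to_deps : List (String × List String)) : List (String × List String) :=
  let dep_to_blobs : PySem.Dict String (List String) :=
    blobs_to_deps.foldl
      (fun d p => p.2.foldl (fun d dep => d.modify dep [] (· ++ [p.1])) d)
      PySem.Dict.empty
  let available_blobs : PySem.Set String := PySem.Set.ofList (blobs_to_deps.map Prod.fst)
  let missing : PySem.Dict String (List String) :=
    dep_to_blobs.items.foldl
      (fun m p => if available_blobs.contains p.1 = false then m.insert p.1 p.2 else m)
      PySem.Dict.empty
  missing.items

-- ===== PORT B =====
-- flatten to (dep, blob) pairs; ordered-dedup the missing deps; gather each dep's blobs by scanning the pairs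
def identify_missing_alt (blobs_to_deps : List (String × List String)) : List (String × List String) :=
  let available : PySem.Set String := PySem.Set.ofList (blobs_to_deps.map Prod.fst)
  let pairs : List (String × String) :=
    blobs_to_deps.flatMap (fun p => p.2.map (fun dep => (dep, p.1)))
  let order : List String :=
    PySem.List.dedup ((pairs.filter (fun q => !(available.contains q.1))).map Prod.fst)
  order.map (fun dep => (dep, (pairs.filter (fun q => q.1 == dep)).map Prod.snd))

-- ===== PRECONDITION & SPEC =====
def Spec_identify_missing (blobs_to_deps : List (String × List String)) (out : List (String × List String)) : Prop := out = identify_missing_alt blobs_to_deps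
instance (blobs_to_deps : List (String × List String)) (out : List (String × List String)) : Decidable (Spec_identify_missing blobs_to_deps out) := by unfold Spec_identify_missing; infer_instance

-- ===== CLAIM (what is proved, stated in full; the proofs are below) =====
def Claim_equal_identify_missing : Prop := ∀ (blobs_to_deps : List (String × List String)), Dom_identify_missing blobs_to_deps → Spec_identify_missing blobs_to_deps (identify_missing blobs_to_deps)

-- ===== LEMMAS AND PROOFS =====

-- the (dep, blob) pairs both programs process, in processing order
def pvPairs (l : List (String × List String)) : List (String × String) :=
  l.flatMap (fun p => p.2.map (fun dep => (dep, p.1)))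

-- a nested fold over (blob, deps) rows is the flat fold over the (dep, blob) pairs
theorem foldl_pvPairs {σ : Type} (f : σ → String → String → σ) :
    ∀ (l : List (String × List String)) (s : σ),
      l.foldl (fun s p => p.2.foldl (fun s dep => f s dep p.1) s) s
        = (pvPairs l).foldl (fun s q => f s q.1 q.2) s := by
  intro l
  induction l with
  | nil => intro s; rfl
  | cons p l ih =>
      intro s
      simp only [pvPairs, List.flatMap_cons, List.foldl_cons, List.foldl_append, List.foldl_map, ih, pvPairs]

-- Set.ofList commutes with filter
theorem ofList_filter (p : String → Bool) :
    ∀ (xs : List String),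
      PySem.Set.ofList (xs.filter p) = (PySem.Set.ofList xs).filter p := by
  intro xs
  induction xs using List.reverseRecOn with
  | nil => rfl
  | append_singleton xs x ih =>
      rw [List.filter_append, PySem.Set.ofList_append_singleton]
      by_cases hx : p x
      · rw [show List.filter p [x] = [x] by simp [hx], PySem.Set.ofList_append_singleton, ih,
          PySem.Set.add_eq_ite, PySem.Set.add_eq_ite]
        by_cases hm : x ∈ PySem.Set.ofList xs
        · have hmf : x ∈ List.filter p (PySem.Set.ofList xs) := List.mem_filter.mpr ⟨hm, hx⟩
          simp [hm, hmf]
        · have hmf : x ∉ List.filter p (PySem.Set.ofList xs) := fun h => hm (List.mem_filter.mp h).1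
          simp [hm, hmf, List.filter_append, hx]
      · rw [show List.filter p [x] = [] by simp [hx], List.append_nil, ih, PySem.Set.add_eq_ite]
        by_cases hm : x ∈ PySem.Set.ofList xs
        · simp [hm]
        · simp [hm, List.filter_append, hx]

-- the final A-loop over items with pairwise-distinct, fresh keys builds exactly the filtered items
theorem foldl_if_insert_fresh (c : String → Bool) :
    ∀ (its : List (String × List String)) (m : PySem.Dict String (List String)),
      (∀ p ∈ its, m.contains p.1 = false) → (its.map Prod.fst).Nodup →
      (its.foldl (fun m p => if c p.1 = false then m.insert p.1 p.2 else m) m).items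
        = m.items ++ its.filter (fun p => !c p.1) := by
  intro its
  induction its with
  | nil => intro m _ _; simp
  | cons p its ih =>
      intro m hfresh hnd
      simp only [List.map_cons, List.nodup_cons] at hnd
      by_cases hc : c p.1
      · rw [List.foldl_cons, if_neg (by simp [hc]),
          ih m (fun q hq => hfresh q (List.mem_cons_of_mem _ hq)) hnd.2]
        simp [hc]
      · rw [List.foldl_cons, if_pos (by simp [hc]),
          ih (m.insert p.1 p.2) ?_ hnd.2]
        · rw [PySem.Dict.items_insert_of_not_contains m p.2 (hfresh p (List.mem_cons_self))]
          simp [hc]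
        · intro q hq
          rw [PySem.Dict.contains_insert]
          have hne : q.1 ≠ p.1 := by
            intro h; exact hnd.1 (h ▸ List.mem_map_of_mem hq)
          simp [hne, hfresh q (List.mem_cons_of_mem _ hq)]

-- characterisation of the grouping fold's items via keys and lookups
theorem items_group (l : List (String × String)) :
    (l.foldl (fun d q => d.modify q.1 [] (· ++ [q.2])) (PySem.Dict.empty : PySem.Dict String (List String))).items
      = (PySem.Set.ofList (l.map Prod.fst)).map
          (fun k => (k, (l.filter (fun q => q.1 == k)).map Prod.snd)) := by
  have hnd : (l.foldl (fun d q => d.modify q.1 [] (· ++ [q.2])) (PySem.Dict.empty : PySem.Dict String (List String))).keys.Nodup :=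
    PySem.Dict.nodup_keys_foldl_modify_key l Prod.fst [] (fun d q => (· ++ [q.2])) _ (by simp [pysem])
  have hkeys : (l.foldl (fun d q => d.modify q.1 [] (· ++ [q.2])) (PySem.Dict.empty : PySem.Dict String (List String))).keys
      = PySem.Set.ofList (l.map Prod.fst) := by
    rw [PySem.Dict.keys_foldl_modify_key, PySem.Dict.keys_empty, PySem.Set.update_nil_left]
  rw [PySem.Dict.items_eq_map_keys _ hnd [], hkeys]
  apply List.map_congr_left
  intro k _
  rw [PySem.Dict.getD_foldl_modify_append]
  simp [pysem]

-- nodup keys of the grouping dict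
theorem nodup_keys_group (l : List (String × String)) :
    (l.foldl (fun d q => d.modify q.1 [] (· ++ [q.2])) (PySem.Dict.empty : PySem.Dict String (List String))).keys.Nodup :=
  PySem.Dict.nodup_keys_foldl_modify_key l Prod.fst [] (fun d q => (· ++ [q.2])) _ (by simp [pysem])

-- ===== VERDICT (by name: the statement is the Claim_ definition above) =====
theorem identify_missing_spec : Claim_equal_identify_missing := by
  intro l _
  unfold Spec_identify_missing identify_missing identify_missing_alt
  simp only
  rw [foldl_pvPairs (fun d dep blob => PySem.Dict.modify d dep [] (· ++ [blob])) l PySem.Dict.empty]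
  set avail := PySem.Set.ofList (l.map Prod.fst) with havail
  set P := pvPairs l with hP
  -- A side: the final loop keeps exactly the missing entries of the grouped items
  rw [foldl_if_insert_fresh (fun k => avail.contains k) _ PySem.Dict.empty
      (by intro p _; simp [pysem]) (nodup_keys_group P)]
  rw [show (PySem.Dict.empty : PySem.Dict String (List String)).items = [] from rfl, List.nil_append]
  rw [items_group P, List.filter_map]
  have hpred : (PySem.Set.ofList (P.map Prod.fst)).filter
      ((fun p : String × List String => !avail.contains p.1) ∘
        (fun k => (k, (P.filter (fun q => q.1 == k)).map Prod.snd)))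
      = (PySem.Set.ofList (P.map Prod.fst)).filter (fun k => !avail.contains k) := by
    apply List.filter_congr; intro k _; rfl
  rw [hpred]
  -- B side: ordered dedup of the filtered dep stream is the filtered key set
  have horder : PySem.List.dedup ((P.filter (fun q => !(avail.contains q.1))).map Prod.fst)
      = (PySem.Set.ofList (P.map Prod.fst)).filter (fun k => !avail.contains k) := by
    rw [PySem.List.dedup_eq_ofList,
      show (P.filter (fun q => !(avail.contains q.1))).map Prod.fst
          = (P.map Prod.fst).filter (fun k => !avail.contains k) from by rw [List.filter_map]; rfl,
      ofList_filter]
  rw [show (List.flatMap (fun p => List.map (fun dep => (dep, p.1)) p.2) l) = P from rfl, horder]
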